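-- pv_equiv track=rewrite | github.com/Sjanoki/GGW-World | interior_viewer.py | ship_computer_ordered_devices
-- ===== SOURCE A (Python) =====
-- from typing import Any, Dict, List, Optional, Sequence, Tuple
--
-- SHIP_POWER_GROUP_ORDER = ["Reactor", "Life Support", "Nav & Comms", "Misc"]
--
-- def ship_computer_ordered_devices(summary: Dict) -> List[Dict]:
--     devices = summary.get("devices") or []
--     grouped: Dict[str, List[Dict]] = {}
--     for entry in devices:
--         group = entry.get("group", "Misc")
--         grouped.setdefault(group, []).append(entry)
--     ordered: List[Dict] = []
--     for group in SHIP_POWER_GROUP_ORDER: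
--         for entry in sorted(grouped.get(group, []), key=lambda item: item.get("name", "")):
--             ordered.append(entry)
--     # Include any unexpected groups at the end
--     for group, entries in grouped.items():
--         if group in SHIP_POWER_GROUP_ORDER:
--             continue
--         for entry in sorted(entries, key=lambda item: item.get("name", "")):
--             ordered.append(entry)
--     return ordered
-- ===== SOURCE B (Python) =====
-- SHIP_POWER_GROUP_ORDER = ["Reactor", "Life Support", "Nav & Comms", "Misc"]
--
-- def ship_computer_ordered_devices(summary):
--     devices = summary.get("devices") or []
--     rank = {g: i for i, g in enumerate(SHIP_POWER_GROUP_ORDER)}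
--     for entry in devices:
--         rank.setdefault(entry.get("group", "Misc"), len(rank))
--     return sorted(devices, key=lambda e: (rank[e.get("group", "Misc")], e.get("name", "")))
-- ===== Notes on version B (the rewrite author's own statement) =====
-- stated objective: alternative
-- what changed: Replaces bucket-grouping into a dict plus per-group sorts and concatenation by one pass that builds a group->rank dict (known groups by SHIP_POWER_GROUP_ORDER index, unexpected groups by first appearance) followed by a single stable sort on the (rank, name) key.
import Mathlib
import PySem

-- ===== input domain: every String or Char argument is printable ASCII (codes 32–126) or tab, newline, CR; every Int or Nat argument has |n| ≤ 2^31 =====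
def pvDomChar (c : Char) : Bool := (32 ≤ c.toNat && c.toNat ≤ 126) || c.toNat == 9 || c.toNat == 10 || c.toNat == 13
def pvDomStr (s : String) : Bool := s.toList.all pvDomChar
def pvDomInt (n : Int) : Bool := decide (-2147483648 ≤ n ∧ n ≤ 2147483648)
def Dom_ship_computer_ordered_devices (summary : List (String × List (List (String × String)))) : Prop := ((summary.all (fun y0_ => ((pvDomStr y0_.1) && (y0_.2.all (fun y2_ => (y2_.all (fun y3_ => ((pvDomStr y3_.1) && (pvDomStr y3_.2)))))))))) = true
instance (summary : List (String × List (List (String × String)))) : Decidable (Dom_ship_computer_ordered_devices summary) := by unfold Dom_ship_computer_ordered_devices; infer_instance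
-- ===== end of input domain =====

-- ===== PORT A =====
-- B changes the decomposition: one global stable sort on a (group-rank, name) key replaces
-- bucket-grouping, per-group sorts and concatenation; same cost class (objective: alternative).

-- shared helpers (both Pythons use the same SHIP_POWER_GROUP_ORDER constant and entry.get)
def pvGetD (e : List (String × String)) (k dflt : String) : String :=
  ((PySem.Dict.mk e).get? k).getD dflt

def pvOrder : List String := ["Reactor", "Life Support", "Nav & Comms", "Misc"]

def pvGroup (e : List (String × String)) : String := pvGetD e "group" "Misc"

def pvName (e : List (String × String)) : String := pvGetD e "name" ""

def ship_computer_ordered_devices (summary : List (String × List (List (String × String)))) : List (List (String × String)) :=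
  -- summary.get("devices") or []  (absent key and empty list both give [])
  let devices := ((PySem.Dict.mk summary).get? "devices").getD []
  -- grouped.setdefault(group, []).append(entry)  ==  grouped[group] = grouped.get(group, []) + [entry]
  let grouped : PySem.Dict String (List (List (String × String))) :=
    devices.foldl (fun d entry => d.modify (pvGroup entry) [] (fun v => v ++ [entry])) PySem.Dict.empty
  let ordered : List (List (String × String)) :=
    pvOrder.foldl (fun acc group =>
      (PySem.List.sorted (grouped.getD group []) (fun item => pvName item) false).foldl
        (fun a entry => a ++ [entry]) acc) []
  grouped.items.foldl (fun acc p =>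
    if pvOrder.contains p.1 then acc
    else (PySem.List.sorted p.2 (fun item => pvName item) false).foldl
      (fun a entry => a ++ [entry]) acc) ordered

-- ===== PORT B =====
def ship_computer_ordered_devices_alt (summary : List (String × List (List (String × String)))) : List (List (String × String)) :=
  let devices := ((PySem.Dict.mk summary).get? "devices").getD []
  -- rank = {g: i for i, g in enumerate(SHIP_POWER_GROUP_ORDER)}
  let rank0 : PySem.Dict String Int :=
    (PySem.List.enumerate pvOrder).foldl (fun d p => d.insert p.2 p.1) PySem.Dict.empty
  -- for entry in devices: rank.setdefault(entry.get("group", "Misc"), len(rank))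
  let rank := devices.foldl (fun d entry => d.setdefault (pvGroup entry) (d.size : Int)) rank0
  -- sorted(devices, key=lambda e: (rank[e.get("group","Misc")], e.get("name","")))
  -- rank[...] never raises: every group occurring in devices is a key of rank, so getD is exact
  PySem.List.sorted2 devices (fun e => rank.getD (pvGroup e) 0) (fun e => pvName e) false

-- ===== PRECONDITION & SPEC =====
def Spec_ship_computer_ordered_devices (summary : List (String × List (List (String × String)))) (out : List (List (String × String))) : Prop := out = ship_computer_ordered_devices_alt summary
instance (summary : List (String × List (List (String × String)))) (out : List (List (String × String))) : Decidable (Spec_ship_computer_ordered_devices summary out) := by unfold Spec_ship_computer_ordered_devices; infer_instance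

-- ===== CLAIM (what is proved, stated in full; the proofs are below) =====
def Claim_equal_ship_computer_ordered_devices : Prop := ∀ (summary : List (String × List (List (String × String)))), Dom_ship_computer_ordered_devices summary → Spec_ship_computer_ordered_devices summary (ship_computer_ordered_devices summary)

-- ===== LEMMAS AND PROOFS =====

-- insertBy facts specific to this decomposition
theorem pv_insertBy_congr {α : Type} (b1 b2 : α → α → Bool) (x : α) (ys : List α)
    (h : ∀ y ∈ ys, b1 x y = b2 x y) :
    PySem.List.insertBy b1 x ys = PySem.List.insertBy b2 x ys := by
  induction ys with
  | nil => rfl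
  | cons y ys ih =>
    simp only [PySem.List.insertBy, h y (by simp)]
    split
    · rfl
    · simp only [List.cons.injEq, true_and]
      exact ih (fun z hz => h z (by simp [hz]))

theorem pv_insertBy_skip {α : Type} (before : α → α → Bool) (x : α) (A R : List α)
    (h : ∀ a ∈ A, before x a = false) :
    PySem.List.insertBy before x (A ++ R) = A ++ PySem.List.insertBy before x R := by
  induction A with
  | nil => rfl
  | cons a A ih =>
    simp only [List.cons_append, PySem.List.insertBy, h a (by simp)]
    simp only [Bool.false_eq_true, if_false, List.cons.injEq, true_and]
    exact ih (fun z hz => h z (by simp [hz]))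

theorem pv_insertBy_stop {α : Type} (before : α → α → Bool) (x : α) (B C : List α)
    (h : ∀ c ∈ C, before x c = true) :
    PySem.List.insertBy before x (B ++ C) = PySem.List.insertBy before x B ++ C := by
  induction B with
  | nil =>
    cases C with
    | nil => rfl
    | cons c C => simp [PySem.List.insertBy, h c (by simp)]
  | cons b B ih =>
    simp only [List.cons_append, PySem.List.insertBy]
    split
    · rfl
    · simp only [List.cons_append, List.cons.injEq, true_and]
      exact ih

theorem pv_flatMap_if_filter {α β : Type} (l : List α) (p : α → Bool) (F : α → List β) :
    l.flatMap (fun a => if p a then [] else F a) = (l.filter (fun a => !p a)).flatMap F := by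
  induction l with
  | nil => rfl
  | cons a l ih =>
    by_cases h : p a <;> simp [h, ih]

-- the lexicographic before-function of sorted2 on an (Int, String) key
def pvLexB {α : Type} (k1 : α → Int) (k2 : α → String) (a b : α) : Bool :=
  decide (k1 a < k1 b) || (!decide (k1 b < k1 a) && decide (k2 a < k2 b))

theorem pv_sorted2_eq_foldl {α : Type} (xs : List α) (k1 : α → Int) (k2 : α → String) :
    PySem.List.sorted2 xs k1 k2 false =
      xs.foldl (fun acc x => PySem.List.insertBy (pvLexB k1 k2) x acc) [] := by
  rfl

-- inserting x into a rank-blocked concatenation inserts into x's own block, by name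
theorem pv_insert_flatMap {α : Type} (k1 : α → Int) (k2 : α → String) (x : α) (F : Int → List α)
    (hF : ∀ v y, y ∈ F v → k1 y = v) :
    ∀ (vs : List Int), vs.Pairwise (· < ·) → k1 x ∈ vs →
      PySem.List.insertBy (pvLexB k1 k2) x (vs.flatMap F) =
        vs.flatMap (fun v => if v = k1 x then
          PySem.List.insertBy (fun a b => decide (k2 a < k2 b)) x (F v) else F v) := by
  intro vs
  induction vs with
  | nil => intro _ h; simp at h
  | cons v rest ih =>
    intro hp hm
    have hvlt := (List.pairwise_cons.mp hp).1
    have hpt := (List.pairwise_cons.mp hp).2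
    simp only [List.flatMap_cons]
    by_cases hv : v = k1 x
    · rw [pv_insertBy_stop]
      · have h1 : PySem.List.insertBy (pvLexB k1 k2) x (F v) =
            PySem.List.insertBy (fun a b => decide (k2 a < k2 b)) x (F v) := by
          apply pv_insertBy_congr
          intro y hy
          have hk : k1 y = k1 x := by rw [hF v y hy, hv]
          simp [pvLexB, hk]
        rw [h1, if_pos hv]
        congr 1
        apply List.flatMap_congr
        intro w hw
        have : v < w := hvlt w hw
        rw [if_neg (by omega)]
      · intro c hc
        rcases List.mem_flatMap.mp hc with ⟨w, hw, hcw⟩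
        have h1 : k1 c = w := hF w c hcw
        have h2 : v < w := hvlt w hw
        simp [pvLexB, h1, ← hv]
        omega
    · have hm' : k1 x ∈ rest := by
        rcases List.mem_cons.mp hm with h | h
        · exact absurd h.symm hv
        · exact h
      have hlt : v < k1 x := hvlt _ hm'
      rw [pv_insertBy_skip]
      · rw [ih hpt hm', if_neg hv]
      · intro a ha
        have hk : k1 a = v := hF v a ha
        simp [pvLexB, hk]
        omega

theorem pv_sorted2_append_singleton {α : Type} (xs : List α) (x : α)
    (k1 : α → Int) (k2 : α → String) :
    PySem.List.sorted2 (xs ++ [x]) k1 k2 false =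
      PySem.List.insertBy (pvLexB k1 k2) x (PySem.List.sorted2 xs k1 k2 false) := by
  rw [pv_sorted2_eq_foldl, pv_sorted2_eq_foldl, List.foldl_append]
  rfl

-- sorted2 only looks at the keys of the elements being sorted
theorem pv_sorted2_key_congr {α : Type} (xs : List α) (k1 k1' : α → Int) (k2 : α → String)
    (h : ∀ x ∈ xs, k1 x = k1' x) :
    PySem.List.sorted2 xs k1 k2 false = PySem.List.sorted2 xs k1' k2 false := by
  induction xs using List.reverseRecOn with
  | nil => rfl
  | append_singleton xs x ih =>
    rw [pv_sorted2_append_singleton, pv_sorted2_append_singleton]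
    rw [ih (fun y hy => h y (by simp [hy]))]
    apply pv_insertBy_congr
    intro y hy
    have hyx : y ∈ xs := ((PySem.List.sorted2_perm xs k1' k2 false).mem_iff).mp hy
    simp [pvLexB, h x (by simp), h y (by simp [hyx])]

-- a stable sort on a (rank, name) key is the concatenation, rank block by rank block,
-- of the name-sorted blocks
theorem pv_sorted2_eq_flatMap {α : Type} (xs : List α) (k1 : α → Int) (k2 : α → String)
    (vs : List Int) (hv : vs.Pairwise (· < ·)) (hall : ∀ x ∈ xs, k1 x ∈ vs) :
    PySem.List.sorted2 xs k1 k2 false =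
      vs.flatMap (fun v => PySem.List.sorted (xs.filter (fun x => k1 x == v)) k2 false) := by
  induction xs using List.reverseRecOn with
  | nil =>
    have : ∀ v : Int, PySem.List.sorted (List.filter (fun x => k1 x == v) []) k2 false = [] := by
      intro v; rfl
    simp only [List.filter_nil]
    simp [PySem.List.sorted2, PySem.List.sorted]
  | append_singleton xs x ih =>
    rw [pv_sorted2_append_singleton, ih (fun y hy => hall y (by simp [hy]))]
    rw [pv_insert_flatMap k1 k2 x _ ?_ vs hv (hall x (by simp))]
    · apply List.flatMap_congr
      intro v hvv
      have hfil : (xs ++ [x]).filter (fun y => k1 y == v) =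
          xs.filter (fun y => k1 y == v) ++ (if k1 x == v then [x] else []) := by
        rw [List.filter_append]
        congr 1
        simp [List.filter_cons]
      by_cases hvx : v = k1 x
      · rw [if_pos hvx, hfil, if_pos (by simp [hvx])]
        rw [PySem.List.sorted_eq_foldl_insertBy, PySem.List.sorted_eq_foldl_insertBy,
          List.foldl_append]
        rfl
      · rw [if_neg hvx, hfil, if_neg (by simp; omega), List.append_nil]
    · intro v y hy
      have h1 := (PySem.List.mem_sorted _ _ _ _).mp hy
      have h2 := List.of_mem_filter h1
      simpa using h2

-- the grouping loop of A, read off its dictionary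
theorem pv_grouped_getD (dv : List (List (String × String))) (q : String) :
    (dv.foldl (fun d entry => d.modify (pvGroup entry) [] (fun v => v ++ [entry]))
        (PySem.Dict.empty : PySem.Dict String (List (List (String × String))))).getD q [] =
      dv.filter (fun e => pvGroup e == q) := by
  have hmap : dv.foldl (fun d entry => d.modify (pvGroup entry) [] (fun v => v ++ [entry]))
        (PySem.Dict.empty : PySem.Dict String (List (List (String × String)))) =
      (dv.map (fun e => (pvGroup e, e))).foldl
        (fun d p => d.modify p.1 [] (fun v => v ++ [p.2])) PySem.Dict.empty := by
    rw [List.foldl_map]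
  rw [hmap, PySem.Dict.getD_foldl_modify_append]
  simp [List.filter_map, Function.comp_def]

theorem pv_grouped_keys (dv : List (List (String × String))) :
    (dv.foldl (fun d entry => d.modify (pvGroup entry) [] (fun v => v ++ [entry]))
        (PySem.Dict.empty : PySem.Dict String (List (List (String × String))))).keys =
      PySem.Set.ofList (dv.map pvGroup) := by
  rw [PySem.Dict.keys_foldl_modify_key dv pvGroup [] (fun d e v => v ++ [e])]
  simp [PySem.Dict.keys_empty, PySem.Set.update_nil_left]

-- the rank-building loop of B: keys in first-insertion order, each key mapped to its index
theorem pv_rank_inv (l : List (List (String × String))) :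
    ∀ (d : PySem.Dict String Int), d.keys.Nodup →
      (∀ q v, d.get? q = some v → v = (d.keys.idxOf q : Int)) →
      (l.foldl (fun d entry => d.setdefault (pvGroup entry) (d.size : Int)) d).keys =
          PySem.Set.update d.keys (l.map pvGroup) ∧
        (l.foldl (fun d entry => d.setdefault (pvGroup entry) (d.size : Int)) d).keys.Nodup ∧
        (∀ q v, (l.foldl (fun d entry => d.setdefault (pvGroup entry) (d.size : Int)) d).get? q = some v →
          v = (((l.foldl (fun d entry => d.setdefault (pvGroup entry) (d.size : Int)) d).keys).idxOf q : Int)) := by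
  induction l with
  | nil =>
    intro d hnd hval
    refine ⟨by simp [PySem.Set.update_nil], hnd, hval⟩
  | cons e l ih =>
    intro d hnd hval
    simp only [List.foldl_cons, List.map_cons, PySem.Set.update_cons]
    by_cases hc : d.contains (pvGroup e) = true
    · rw [PySem.Dict.setdefault_of_contains d _ hc]
      have hmem : pvGroup e ∈ d.keys := (PySem.Dict.contains_iff_mem_keys d _).mp hc
      rw [PySem.Set.add_of_mem hmem] at *
      exact ih d hnd hval
    · have hc' : d.contains (pvGroup e) = false := by
        cases h : d.contains (pvGroup e)
        · rfl
        · exact absurd h hc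
      rw [PySem.Dict.setdefault_of_not_contains d _ hc']
      have hnm : pvGroup e ∉ d.keys := fun h =>
        hc ((PySem.Dict.contains_iff_mem_keys d _).mpr h)
      have hkeys : (d.insert (pvGroup e) (d.size : Int)).keys = d.keys ++ [pvGroup e] :=
        PySem.Dict.keys_insert_of_not_contains d _ hc'
      have hnd' : (d.insert (pvGroup e) (d.size : Int)).keys.Nodup := by
        rw [hkeys]
        simp only [List.nodup_append, List.nodup_cons, List.not_mem_nil, not_false_eq_true,
          List.nodup_nil, and_true, true_and, hnd]
        intro a ha b hb
        simp only [List.mem_singleton] at hb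
        subst hb
        intro he
        exact hnm (he ▸ ha)
      have hval' : ∀ q v, (d.insert (pvGroup e) (d.size : Int)).get? q = some v →
          v = (((d.insert (pvGroup e) (d.size : Int)).keys).idxOf q : Int) := by
        intro q v hq
        rw [PySem.Dict.get?_insert] at hq
        rw [hkeys, List.idxOf_append]
        split_ifs at hq with h1
        · subst h1
          have hv : v = (d.size : Int) := (Option.some.inj hq).symm
          rw [if_neg hnm, hv]
          have hsz : d.size = d.keys.length := by
            simp [PySem.Dict.size, PySem.Dict.keys]
          have hix : List.idxOf (pvGroup e) [pvGroup e] = 0 := by simp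
          rw [hix, hsz]
          push_cast
          ring
        · have hqmem : q ∈ d.keys := by
            by_contra hqn
            rw [(PySem.Dict.get?_eq_none_iff_not_mem_keys d q).mpr hqn] at hq
            simp at hq
          rw [if_pos hqmem]
          exact hval q v hq
      rw [PySem.Set.add_of_not_mem hnm, ← hkeys]
      exact ih _ hnd' hval'

-- the common normal form: power groups in order, unexpected groups by first appearance,
-- each group's devices sorted by name
def pvT (dv : List (List (String × String))) (q : String) : List (List (String × String)) :=
  PySem.List.sorted (dv.filter (fun e => pvGroup e == q)) (fun item => pvName item) false

def pvK (dv : List (List (String × String))) : List String :=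
  PySem.Set.update pvOrder (dv.map pvGroup)

theorem pv_A_eq (dv : List (List (String × String))) :
    ((dv.foldl (fun d entry => d.modify (pvGroup entry) [] (fun v => v ++ [entry]))
        (PySem.Dict.empty : PySem.Dict String (List (List (String × String))))).items.foldl
      (fun acc p =>
        if pvOrder.contains p.1 then acc
        else (PySem.List.sorted p.2 (fun item => pvName item) false).foldl
          (fun a entry => a ++ [entry]) acc)
      (pvOrder.foldl (fun acc group =>
        (PySem.List.sorted
            ((dv.foldl (fun d entry => d.modify (pvGroup entry) [] (fun v => v ++ [entry]))
              (PySem.Dict.empty : PySem.Dict String (List (List (String × String))))).getD group [])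
            (fun item => pvName item) false).foldl
          (fun a entry => a ++ [entry]) acc) [])) =
    (pvK dv).flatMap (pvT dv) := by
  set G := dv.foldl (fun d entry => d.modify (pvGroup entry) [] (fun v => v ++ [entry]))
      (PySem.Dict.empty : PySem.Dict String (List (List (String × String)))) with hGdef
  have hkeys : G.keys = PySem.Set.ofList (dv.map pvGroup) := pv_grouped_keys dv
  have hknd : G.keys.Nodup := by rw [hkeys]; exact PySem.Set.nodup_ofList _
  have hgetD : ∀ q, G.getD q [] = dv.filter (fun e => pvGroup e == q) := pv_grouped_getD dv
  simp only [PySem.List.foldl_append_singleton_eq_self]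
  have hfun : (fun (acc : List (List (String × String))) (p : String × List (List (String × String))) =>
        if pvOrder.contains p.1 then acc
        else acc ++ PySem.List.sorted p.2 (fun item => pvName item) false) =
      (fun acc p => acc ++ (if pvOrder.contains p.1 then []
        else PySem.List.sorted p.2 (fun item => pvName item) false)) := by
    funext acc p
    split <;> simp
  rw [hfun, PySem.List.foldl_append_eq_flatMap, PySem.List.foldl_append_eq_flatMap,
    List.nil_append]
  rw [PySem.Dict.items_eq_map_keys G hknd [], List.flatMap_map, hkeys]
  simp only [hgetD]
  rw [pv_flatMap_if_filter]
  rw [← List.flatMap_append]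
  have hK : pvK dv = pvOrder ++ (PySem.Set.ofList (dv.map pvGroup)).filter
      (fun k => !pvOrder.contains k) := by
    have := PySem.Set.update_eq_append_filter pvOrder (dv.map pvGroup)
    simpa [PySem.Set.contains_eq_listContains] using this
  rw [← hK]
  rfl

-- rank0 facts
theorem pv_rank0_keys :
    ((PySem.List.enumerate pvOrder).foldl (fun d p => d.insert p.2 p.1)
      (PySem.Dict.empty : PySem.Dict String Int)).keys = pvOrder := by
  decide

theorem pv_rank0_val (q : String) (v : Int)
    (h : ((PySem.List.enumerate pvOrder).foldl (fun d p => d.insert p.2 p.1)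
      (PySem.Dict.empty : PySem.Dict String Int)).get? q = some v) :
    v = (List.idxOf q (((PySem.List.enumerate pvOrder).foldl (fun d p => d.insert p.2 p.1)
      (PySem.Dict.empty : PySem.Dict String Int)).keys) : Int) := by
  rw [pv_rank0_keys]
  have hq : ((PySem.List.enumerate pvOrder).foldl (fun d p => d.insert p.2 p.1)
      (PySem.Dict.empty : PySem.Dict String Int)).get? q =
      (PySem.Dict.mk [("Reactor", (0 : Int)), ("Life Support", 1), ("Nav & Comms", 2),
        ("Misc", 3)]).get? q := by rfl
  rw [hq] at h
  simp only [PySem.Dict.get?_mk_cons] at h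
  split_ifs at h with h1 h2 h3 h4
  · have hqe : q = "Reactor" := by simpa [eq_comm] using (beq_iff_eq.mp h1)
    subst hqe
    injection h with h
    subst h
    decide
  · have hqe : q = "Life Support" := by simpa [eq_comm] using (beq_iff_eq.mp h2)
    subst hqe
    injection h with h
    subst h
    decide
  · have hqe : q = "Nav & Comms" := by simpa [eq_comm] using (beq_iff_eq.mp h3)
    subst hqe
    injection h with h
    subst h
    decide
  · have hqe : q = "Misc" := by simpa [eq_comm] using (beq_iff_eq.mp h4)
    subst hqe
    injection h with h
    subst h
    decide
  · have hcontra : (none : Option Int) = some v := h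
    simp at hcontra

theorem pv_B_eq (dv : List (List (String × String))) :
    PySem.List.sorted2 dv
      (fun e => ((dv.foldl (fun d entry => d.setdefault (pvGroup entry) (d.size : Int))
        ((PySem.List.enumerate pvOrder).foldl (fun d p => d.insert p.2 p.1)
          (PySem.Dict.empty : PySem.Dict String Int))).getD (pvGroup e) 0))
      (fun e => pvName e) false =
    (pvK dv).flatMap (pvT dv) := by
  set R0 := (PySem.List.enumerate pvOrder).foldl (fun d p => d.insert p.2 p.1)
      (PySem.Dict.empty : PySem.Dict String Int) with hR0def
  set R := dv.foldl (fun d entry => d.setdefault (pvGroup entry) (d.size : Int)) R0 with hRdef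
  have hnd0 : R0.keys.Nodup := by rw [pv_rank0_keys]; decide
  obtain ⟨hRkeys, hRnd, hRval⟩ := pv_rank_inv dv R0 hnd0 pv_rank0_val
  rw [pv_rank0_keys] at hRkeys
  have hKeq : R.keys = pvK dv := hRkeys
  have hKnd : (pvK dv).Nodup := hKeq ▸ hRnd
  -- the key looked up for a device of dv is its index in pvK dv
  have hkey : ∀ e ∈ dv, R.getD (pvGroup e) 0 = ((pvK dv).idxOf (pvGroup e) : Int) := by
    intro e he
    have hmemK : pvGroup e ∈ pvK dv := by
      unfold pvK
      exact (PySem.Set.mem_update _ _ _).mpr (Or.inr (List.mem_map_of_mem he))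
    have hmemKeys : pvGroup e ∈ R.keys := by rw [hKeq]; exact hmemK
    cases hg : R.get? (pvGroup e) with
    | none => exact absurd ((PySem.Dict.get?_eq_none_iff_not_mem_keys R _).mp hg) (by simp [hmemKeys])
    | some v =>
      have hv := hRval _ _ hg
      rw [PySem.Dict.getD_eq_get?_getD, hg]
      rw [hKeq] at hv
      simpa using hv
  rw [pv_sorted2_key_congr dv _ (fun e => ((pvK dv).idxOf (pvGroup e) : Int)) _ hkey]
  have hvsp : ((pvK dv).map (fun q => ((pvK dv).idxOf q : Int))).Pairwise (· < ·) := by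
    rw [List.pairwise_map]
    rw [List.pairwise_iff_getElem]
    intro i j hi hj hij
    rw [List.Nodup.idxOf_getElem hKnd i hi, List.Nodup.idxOf_getElem hKnd j hj]
    exact_mod_cast hij
  have hall : ∀ x ∈ dv, ((pvK dv).idxOf (pvGroup x) : Int) ∈
      ((pvK dv).map (fun q => ((pvK dv).idxOf q : Int))) := by
    intro x hx
    have hmemK : pvGroup x ∈ pvK dv := by
      unfold pvK
      exact (PySem.Set.mem_update _ _ _).mpr (Or.inr (List.mem_map_of_mem hx))
    exact List.mem_map_of_mem hmemK
  rw [pv_sorted2_eq_flatMap dv _ _ _ hvsp hall, List.flatMap_map]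
  apply List.flatMap_congr
  intro q hq
  unfold pvT
  congr 1
  apply List.filter_congr
  intro x hx
  have hmemK : pvGroup x ∈ pvK dv := by
    unfold pvK
    exact (PySem.Set.mem_update _ _ _).mpr (Or.inr (List.mem_map_of_mem hx))
  have hiff : List.idxOf (pvGroup x) (pvK dv) = List.idxOf q (pvK dv) ↔ pvGroup x = q := by
    constructor
    · intro h
      have h1 : List.idxOf (pvGroup x) (pvK dv) < (pvK dv).length :=
        List.idxOf_lt_length_of_mem hmemK
      have h2 := List.getElem_idxOf (x := pvGroup x) (xs := pvK dv) h1
      have h3 := List.getElem_idxOf (x := q) (xs := pvK dv) (h ▸ h1)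
      simp only [h] at h2
      exact h2.symm.trans h3
    · intro h
      rw [h]
  rw [Bool.eq_iff_iff]
  simp only [beq_iff_eq, Int.natCast_inj]
  exact hiff

-- ===== VERDICT (by name: the statement is the Claim_ definition above) =====
theorem ship_computer_ordered_devices_spec : Claim_equal_ship_computer_ordered_devices := by
  intro summary _
  unfold Spec_ship_computer_ordered_devices
  unfold ship_computer_ordered_devices ship_computer_ordered_devices_alt
  exact (pv_A_eq (((PySem.Dict.mk summary).get? "devices").getD [])).trans
    (pv_B_eq (((PySem.Dict.mk summary).get? "devices").getD [])).symm
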